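-- pv_equiv track=rewrite | github.com/zhuyinheng/TilingZoom | utils.py | cal_scale_config
-- ===== SOURCE A (Python) =====
-- def cal_scale_config(
--     H,
--     W,
--     T,
--     space_scale_times,
--     space_scale_factor,
--     temporal_scale_factor,
-- ):
--
--     scale_config = []
--     h, w = H, W
--     t = T // temporal_scale_factor
--     for scale in range(space_scale_times):
--         scale_config.append((t, h, w, f"{t:04d}x{h:04d}x{w:04d}"))
--         h = h // space_scale_factor
--         w = w // space_scale_factor
--     return scale_config
-- ===== SOURCE B (Python) =====
-- def cal_scale_config(
--     H,
--     W,
--     T,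
--     space_scale_times,
--     space_scale_factor,
--     temporal_scale_factor,
-- ):
--     t = T // temporal_scale_factor
--     if space_scale_times < 1:
--         return []
--     # successive dimension pairs: once halving reaches a fixed point, every
--     # remaining scale repeats it, so pad by replication instead of re-dividing
--     dims = [(H, W)]
--     while len(dims) < space_scale_times:
--         h, w = dims[-1]
--         nxt = (h // space_scale_factor, w // space_scale_factor)
--         if nxt == dims[-1]:
--             dims += [nxt] * (space_scale_times - len(dims))
--         else:
--             dims.append(nxt)
--     return [(t, h, w, f"{t:04d}x{h:04d}x{w:04d}") for h, w in dims]
-- ===== Notes on version B (the rewrite author's own statement) =====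
-- stated objective: alternative
-- what changed: Instead of carrying (h, w) through the loop and dividing every iteration, B builds only the distinct halving prefix, stops at the fixed point of the division, pads the remaining scales by list replication, and formats the rows in a final comprehension.
import Mathlib
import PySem

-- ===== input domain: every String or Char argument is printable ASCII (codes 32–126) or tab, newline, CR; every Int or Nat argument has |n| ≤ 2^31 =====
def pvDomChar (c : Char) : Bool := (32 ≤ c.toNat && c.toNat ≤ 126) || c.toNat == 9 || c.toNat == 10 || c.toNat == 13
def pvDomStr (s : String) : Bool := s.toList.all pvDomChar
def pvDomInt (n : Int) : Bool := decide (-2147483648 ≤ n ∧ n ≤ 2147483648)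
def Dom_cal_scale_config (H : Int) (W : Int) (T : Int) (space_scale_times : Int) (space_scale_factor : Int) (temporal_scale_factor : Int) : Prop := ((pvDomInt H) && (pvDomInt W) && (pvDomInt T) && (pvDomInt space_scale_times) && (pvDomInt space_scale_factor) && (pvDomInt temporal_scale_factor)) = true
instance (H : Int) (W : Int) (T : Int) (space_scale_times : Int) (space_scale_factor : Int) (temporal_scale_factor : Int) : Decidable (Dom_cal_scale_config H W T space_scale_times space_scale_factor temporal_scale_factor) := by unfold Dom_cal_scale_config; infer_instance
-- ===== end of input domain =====

-- B replaces A's per-scale halving loop by building only the distinct halving prefix (stopping at the fixed point) and padding by replication; alternative decomposition, same cost.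


-- ===== PORT A =====
-- hand port of the f-string piece "{n:04d}": zero-pad to width 4, the sign counting
-- towards the width (exact for every Int; shared by both ports, as both Pythons use the
-- identical f-string)
def pvZfill (k : Nat) (cs : List Char) : List Char := List.replicate (k - cs.length) '0' ++ cs
def pvFmt04 (n : Int) : String :=
  if n < 0 then String.mk ('-' :: pvZfill 3 (PySem.Int.toChars (-n)))
  else String.mk (pvZfill 4 (PySem.Int.toChars n))
def pvTag (t h w : Int) : String := pvFmt04 t ++ "x" ++ pvFmt04 h ++ "x" ++ pvFmt04 w

def cal_scale_config (H : Int) (W : Int) (T : Int) (space_scale_times : Int) (space_scale_factor : Int) (temporal_scale_factor : Int) : List (Int × Int × Int × String) :=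
  let t := PySem.Int.floordiv T temporal_scale_factor
  let r := (PySem.List.pyRange 0 space_scale_times 1).foldl
    (fun (st : List (Int × Int × Int × String) × Int × Int) _scale =>
      (st.1 ++ [(t, st.2.1, st.2.2, pvTag t st.2.1 st.2.2)],
       PySem.Int.floordiv st.2.1 space_scale_factor,
       PySem.Int.floordiv st.2.2 space_scale_factor))
    (([] : List (Int × Int × Int × String)), H, W)
  r.1

-- ===== PORT B =====
-- Source B's while loop appends one pair per iteration (or finishes by replication), so it
-- runs at most space_scale_times - 1 times; fuel space_scale_times.toNat bounds it, and
-- the loop condition len(dims) < space_scale_times is re-checked each round as in Python.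
-- dims[-1] is PySem.List.pyGetD dims (-1) (with an unreachable default: dims ≠ []).
def pvDimsLoop (ssf sst : Int) : Nat → List (Int × Int) → List (Int × Int)
  | 0, dims => dims
  | fuel + 1, dims =>
    if (dims.length : Int) < sst then
      let last := PySem.List.pyGetD dims (-1) (0, 0)
      let nxt := (PySem.Int.floordiv last.1 ssf, PySem.Int.floordiv last.2 ssf)
      if nxt = last then dims ++ List.replicate (sst - (dims.length : Int)).toNat nxt
      else pvDimsLoop ssf sst fuel (dims ++ [nxt])
    else dims

def cal_scale_config_alt (H : Int) (W : Int) (T : Int) (space_scale_times : Int) (space_scale_factor : Int) (temporal_scale_factor : Int) : List (Int × Int × Int × String) :=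
  let t := PySem.Int.floordiv T temporal_scale_factor
  if space_scale_times < 1 then []
  else
    let dims := pvDimsLoop space_scale_factor space_scale_times space_scale_times.toNat [(H, W)]
    dims.map (fun hw => (t, hw.1, hw.2, pvTag t hw.1 hw.2))

-- ===== PRECONDITION & SPEC =====
-- Pre_ excludes exactly the inputs on which A raises ZeroDivisionError:
-- temporal_scale_factor = 0, or space_scale_factor = 0 with a positive scale count.
def Pre_cal_scale_config (H : Int) (W : Int) (T : Int) (space_scale_times : Int) (space_scale_factor : Int) (temporal_scale_factor : Int) : Prop :=
  temporal_scale_factor ≠ 0 ∧ (space_scale_times ≤ 0 ∨ space_scale_factor ≠ 0)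
instance (H : Int) (W : Int) (T : Int) (space_scale_times : Int) (space_scale_factor : Int) (temporal_scale_factor : Int) : Decidable (Pre_cal_scale_config H W T space_scale_times space_scale_factor temporal_scale_factor) := by unfold Pre_cal_scale_config; infer_instance

def pvWitness_cal_scale_config : Int × Int × Int × Int × Int × Int := (100, 64, 10, 3, 2, 2)

def Spec_cal_scale_config (H : Int) (W : Int) (T : Int) (space_scale_times : Int) (space_scale_factor : Int) (temporal_scale_factor : Int) (out : List (Int × Int × Int × String)) : Prop := out = cal_scale_config_alt H W T space_scale_times space_scale_factor temporal_scale_factor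
instance (H : Int) (W : Int) (T : Int) (space_scale_times : Int) (space_scale_factor : Int) (temporal_scale_factor : Int) (out : List (Int × Int × Int × String)) : Decidable (Spec_cal_scale_config H W T space_scale_times space_scale_factor temporal_scale_factor out) := by unfold Spec_cal_scale_config; infer_instance

-- ===== CLAIM (what is proved, stated in full; the proofs are below) =====
def Claim_equal_cal_scale_config : Prop := ∀ (H : Int) (W : Int) (T : Int) (space_scale_times : Int) (space_scale_factor : Int) (temporal_scale_factor : Int), Dom_cal_scale_config H W T space_scale_times space_scale_factor temporal_scale_factor → Pre_cal_scale_config H W T space_scale_times space_scale_factor temporal_scale_factor → Spec_cal_scale_config H W T space_scale_times space_scale_factor temporal_scale_factor (cal_scale_config H W T space_scale_times space_scale_factor temporal_scale_factor)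

-- ===== LEMMAS AND PROOFS =====

-- one halving step on a dimension pair; k-fold iteration is what both programs compute
def pvStep (ssf : Int) (p : Int × Int) : Int × Int :=
  (PySem.Int.floordiv p.1 ssf, PySem.Int.floordiv p.2 ssf)

-- dims[-1] of a nonempty map over List.range
lemma pvPyGetD_neg_one {α : Type} (xs : List α) (d : α) (h : xs ≠ []) :
    PySem.List.pyGetD xs (-1) d = xs.getLast h := by
  have hl : 1 ≤ xs.length := List.length_pos_iff.mpr h
  simp [PySem.List.pyGetD, PySem.List.pyGet?, PySem.List.pyIdx?, hl,
    List.getElem?_eq_getElem (show xs.length - 1 < xs.length by omega),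
    List.getLast_eq_getElem]

-- invariant of A's loop, whose body ignores the loop variable: starting from pair p,
-- the appended rows are the successive iterates of pvStep
lemma pvLoopA (t f : Int) (l : List Int) :
    ∀ (acc : List (Int × Int × Int × String)) (h w : Int),
      (l.foldl
        (fun (st : List (Int × Int × Int × String) × Int × Int) _scale =>
          (st.1 ++ [(t, st.2.1, st.2.2, pvTag t st.2.1 st.2.2)],
           PySem.Int.floordiv st.2.1 f,
           PySem.Int.floordiv st.2.2 f)) (acc, h, w)).1
      = acc ++ (List.range l.length).map (fun k =>
          (t, ((pvStep f)^[k] (h, w)).1, ((pvStep f)^[k] (h, w)).2,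
           pvTag t ((pvStep f)^[k] (h, w)).1 ((pvStep f)^[k] (h, w)).2)) := by
  induction l with
  | nil => intro acc h w; simp
  | cons a l ih =>
    intro acc h w
    simp only [List.foldl_cons]
    rw [ih]
    simp only [List.length_cons, List.range_succ_eq_map, List.map_cons, List.map_map,
      Function.iterate_zero_apply, List.append_assoc, List.singleton_append]
    refine congrArg (fun xs => acc ++ (t, h, w, pvTag t h w) :: xs) ?_
    exact List.map_congr_left (fun k _ => by
      simp [Function.comp, Function.iterate_succ_apply, pvStep])

-- invariant of B's while loop: if dims holds the first m iterates (1 ≤ m ≤ sst) and the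
-- fuel covers the remaining iterations, the loop produces the first sst iterates —
-- the fixed-point branch is justified because a fixed point of pvStep stays fixed
lemma pvLoopB (ssf sst : Int) (p0 : Int × Int) :
    ∀ (fuel m : Nat), 1 ≤ m → m ≤ sst.toNat → sst.toNat ≤ m + fuel →
      pvDimsLoop ssf sst fuel ((List.range m).map (fun k => (pvStep ssf)^[k] p0))
        = (List.range sst.toNat).map (fun k => (pvStep ssf)^[k] p0) := by
  intro fuel
  induction fuel with
  | zero =>
    intro m h1 h2 h3
    have : m = sst.toNat := by omega
    subst this
    rfl
  | succ fuel ih =>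
    intro m h1 h2 h3
    rw [pvDimsLoop]
    have hne : ((List.range m).map (fun k => (pvStep ssf)^[k] p0)) ≠ [] := by
      simp; omega
    have hlast : PySem.List.pyGetD ((List.range m).map (fun k => (pvStep ssf)^[k] p0)) (-1) (0, 0)
        = (pvStep ssf)^[m - 1] p0 := by
      rw [pvPyGetD_neg_one _ _ hne, List.getLast_eq_getElem]
      simp only [List.length_map, List.length_range, List.getElem_map, List.getElem_range]
    by_cases hlt : ((((List.range m).map (fun k => (pvStep ssf)^[k] p0)).length : Int) < sst)
    · rw [if_pos hlt]
      simp only [hlast]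
      have hmlt : m < sst.toNat := by
        simp only [List.length_map, List.length_range] at hlt; omega
      by_cases hfix : pvStep ssf ((pvStep ssf)^[m - 1] p0) = (pvStep ssf)^[m - 1] p0
      · have hfix' : (PySem.Int.floordiv ((pvStep ssf)^[m-1] p0).1 ssf,
            PySem.Int.floordiv ((pvStep ssf)^[m-1] p0).2 ssf) = (pvStep ssf)^[m - 1] p0 := hfix
        rw [if_pos hfix']
        -- every iterate from m-1 on equals the fixed point
        have hconst : ∀ j : Nat, (pvStep ssf)^[m + j] p0 = (pvStep ssf)^[m - 1] p0 := by
          intro j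
          have hm : m + j = (j + 1) + (m - 1) := by omega
          rw [hm, Function.iterate_add_apply]
          exact Function.iterate_fixed hfix (j + 1)
        have hsplit : sst.toNat = m + (sst.toNat - m) := by omega
        rw [hsplit, List.range_add, List.map_append, List.map_map]
        congr 1
        · simp only [List.length_map, List.length_range]
          have : (sst - (m : Int)).toNat = sst.toNat - m := by omega
          rw [this]
          symm
          rw [List.eq_replicate_iff]
          refine ⟨by simp, ?_⟩
          intro b hb
          simp only [List.mem_map, List.mem_range] at hb
          obtain ⟨j, -, hj⟩ := hb
          rw [← hj]
          simp only [Function.comp]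
          rw [hconst j]
          exact hfix'.symm
      · have hfix' : ¬ ((PySem.Int.floordiv ((pvStep ssf)^[m-1] p0).1 ssf,
            PySem.Int.floordiv ((pvStep ssf)^[m-1] p0).2 ssf) = (pvStep ssf)^[m - 1] p0) := hfix
        rw [if_neg hfix']
        have happ : ((List.range m).map (fun k => (pvStep ssf)^[k] p0)) ++
            [(PySem.Int.floordiv ((pvStep ssf)^[m-1] p0).1 ssf,
              PySem.Int.floordiv ((pvStep ssf)^[m-1] p0).2 ssf)]
            = (List.range (m + 1)).map (fun k => (pvStep ssf)^[k] p0) := by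
          rw [List.range_succ, List.map_append]
          congr 1
          simp only [List.map_cons, List.map_nil]
          congr 1
          show pvStep ssf ((pvStep ssf)^[m-1] p0) = (pvStep ssf)^[m] p0
          conv_rhs => rw [show m = (m - 1) + 1 from by omega]
          rw [Function.iterate_succ_apply']
        rw [happ]
        exact ih (m + 1) (by omega) (by omega) (by omega)
    · rw [if_neg hlt]
      simp only [List.length_map, List.length_range] at hlt
      have : m = sst.toNat := by omega
      subst this
      rfl

theorem cal_scale_config_spec_aux (H W T sst ssf tsf : Int) :
    cal_scale_config H W T sst ssf tsf = cal_scale_config_alt H W T sst ssf tsf := by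
  unfold cal_scale_config cal_scale_config_alt
  by_cases hlt : sst < 1
  · rw [if_pos hlt, PySem.List.pyRange_one_eq_nil (by omega)]
    rfl
  · rw [if_neg hlt]
    have h1 : 1 ≤ sst.toNat := by omega
    have hinit : [((H : Int), (W : Int))] = (List.range 1).map (fun k => (pvStep ssf)^[k] (H, W)) := by
      simp
    rw [pvLoopA _ _ _ [] H W, hinit,
        pvLoopB ssf sst (H, W) sst.toNat 1 (by omega) h1 (by omega),
        List.map_map]
    simp only [PySem.List.length_pyRange_one, List.nil_append, Int.sub_zero]
    exact List.map_congr_left (fun k _ => by simp [Function.comp])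

-- ===== VERDICT (by name: the statement is the Claim_ definition above) =====
theorem cal_scale_config_spec : Claim_equal_cal_scale_config := by
  intro H W T sst ssf tsf _ _
  unfold Spec_cal_scale_config
  exact cal_scale_config_spec_aux H W T sst ssf tsf
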